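-- pv_equiv track=rewrite | github.com/Mind-Goblin-Inc/MindGobblin | tools/generate_indexed_bitmaps.py | grass_tile_variant
-- ===== SOURCE A (Python) =====
-- W = H = 16
--
-- W = H = 16
--
-- def make_sprite(fill=0):
--     return [[fill for _ in range(W)] for _ in range(H)]
--
-- def put(px, x, y, c):
--     if 0 <= x < W and 0 <= y < H:
--         px[y][x] = c
--
-- def grass_tile_variant(seed):
--     s = make_sprite(fill=3)
--     for y in range(H):
--         for x in range(W):
--             n = (x * (11 + seed) + y * (7 + seed * 2) + seed * 13) % 37
--             if n < 4:
--                 put(s, x, y, 11)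
--             elif n in (9, 10):
--                 put(s, x, y, 10)
--             elif (x + y + seed) % 11 == 0:
--                 put(s, x, y, 6)
--     return s
-- ===== SOURCE B (Python) =====
-- W = H = 16
--
-- def grass_tile_variant(seed):
--     s = [[3] * W for _ in range(H)]
--     # layered passes, lowest priority first; later passes overwrite
--     for y in range(H):
--         for x in range(W):
--             if (x + y + seed) % 11 == 0:
--                 s[y][x] = 6
--     for y in range(H):
--         for x in range(W):
--             n = (x * (11 + seed) + y * (7 + seed * 2) + seed * 13) % 37
--             if n in (9, 10):
--                 s[y][x] = 10
--     for y in range(H):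
--         for x in range(W):
--             n = (x * (11 + seed) + y * (7 + seed * 2) + seed * 13) % 37
--             if n < 4:
--                 s[y][x] = 11
--     return s
-- ===== Notes on version B (the rewrite author's own statement) =====
-- stated objective: alternative
-- what changed: B replaces A's single sweep with a per-cell elif chain by three full-grid layered passes (grass-vein 6, then tuft 10, then highlight 11, in reverse priority so later passes overwrite), building the base grid with list repetition instead of a fill helper.
import Mathlib
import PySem

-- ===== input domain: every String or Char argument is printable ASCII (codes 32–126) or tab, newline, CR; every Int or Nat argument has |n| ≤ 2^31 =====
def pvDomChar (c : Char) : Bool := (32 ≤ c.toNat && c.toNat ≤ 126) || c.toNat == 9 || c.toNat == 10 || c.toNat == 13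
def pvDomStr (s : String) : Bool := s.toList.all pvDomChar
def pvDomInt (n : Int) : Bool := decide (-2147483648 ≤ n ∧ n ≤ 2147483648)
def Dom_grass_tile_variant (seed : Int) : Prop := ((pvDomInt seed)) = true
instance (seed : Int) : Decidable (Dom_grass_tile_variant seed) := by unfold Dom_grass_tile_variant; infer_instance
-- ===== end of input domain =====

-- B renders the tile in three layered full-grid passes (lowest priority first, later
-- passes overwrite) instead of A's per-cell elif chain; objective: alternative decomposition.

-- ===== PORT A =====
def pvMakeSprite (fill : Int) : List (List Int) :=
  (PySem.List.pyRange 0 16 1).map (fun _ => (PySem.List.pyRange 0 16 1).map (fun _ => fill))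

def pvPut (px : List (List Int)) (x y c : Int) : List (List Int) :=
  if 0 ≤ x ∧ x < 16 ∧ 0 ≤ y ∧ y < 16 then
    px.set y.toNat ((px.getD y.toNat []).set x.toNat c)
  else px

def grass_tile_variant (seed : Int) : List (List Int) :=
  (PySem.List.pyRange 0 16 1).foldl (fun s y =>
    (PySem.List.pyRange 0 16 1).foldl (fun s x =>
      let n := PySem.Int.mod (x * (11 + seed) + y * (7 + seed * 2) + seed * 13) 37
      if n < 4 then pvPut s x y 11
      else if n = 9 ∨ n = 10 then pvPut s x y 10
      else if PySem.Int.mod (x + y + seed) 11 = 0 then pvPut s x y 6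
      else s) s) (pvMakeSprite 3)

-- ===== PORT B =====
def grass_tile_variant_alt (seed : Int) : List (List Int) :=
  let s0 := (PySem.List.pyRange 0 16 1).map (fun _ => List.replicate 16 (3 : Int))
  let s1 := (PySem.List.pyRange 0 16 1).foldl (fun s y =>
    (PySem.List.pyRange 0 16 1).foldl (fun s x =>
      if PySem.Int.mod (x + y + seed) 11 = 0 then
        s.set y.toNat ((s.getD y.toNat []).set x.toNat 6)
      else s) s) s0
  let s2 := (PySem.List.pyRange 0 16 1).foldl (fun s y =>
    (PySem.List.pyRange 0 16 1).foldl (fun s x =>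
      let n := PySem.Int.mod (x * (11 + seed) + y * (7 + seed * 2) + seed * 13) 37
      if n = 9 ∨ n = 10 then s.set y.toNat ((s.getD y.toNat []).set x.toNat 10)
      else s) s) s1
  (PySem.List.pyRange 0 16 1).foldl (fun s y =>
    (PySem.List.pyRange 0 16 1).foldl (fun s x =>
      let n := PySem.Int.mod (x * (11 + seed) + y * (7 + seed * 2) + seed * 13) 37
      if n < 4 then s.set y.toNat ((s.getD y.toNat []).set x.toNat 11)
      else s) s) s2

-- ===== PRECONDITION & SPEC =====
def Spec_grass_tile_variant (seed : Int) (out : List (List Int)) : Prop := out = grass_tile_variant_alt seed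
instance (seed : Int) (out : List (List Int)) : Decidable (Spec_grass_tile_variant seed out) := by unfold Spec_grass_tile_variant; infer_instance

-- ===== CLAIM (what is proved, stated in full; the proofs are below) =====
def Claim_equal_grass_tile_variant : Prop := ∀ (seed : Int), Dom_grass_tile_variant seed → Spec_grass_tile_variant seed (grass_tile_variant seed)

-- ===== LEMMAS AND PROOFS =====

-- proof-only helpers: a generic guarded-write double loop and its map normal form
def pvRng : List Int := PySem.List.pyRange 0 16 1

def pvCset (s : List (List Int)) (x y : Int) (c : Int) : List (List Int) :=
  s.set y.toNat ((s.getD y.toNat []).set x.toNat c)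

def pvRloop (C : Int → Bool) (v : Int → Int) (xs : List Int) (r : List Int) : List Int :=
  xs.foldl (fun r x => if C x then r.set x.toNat (v x) else r) r

def pvGloop (C : Int → Int → Bool) (v : Int → Int → Int) (s : List (List Int)) : List (List Int) :=
  pvRng.foldl (fun s y =>
    pvRng.foldl (fun s x => if C x y then pvCset s x y (v x y) else s) s) s

def pvTileOf (f : Int → Int → Int) : List (List Int) :=
  pvRng.map (fun y => pvRng.map (fun x => f x y))

theorem pvRloop_length (C : Int → Bool) (v : Int → Int) (xs r : List Int) :
    (pvRloop C v xs r).length = r.length := by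
  induction xs generalizing r with
  | nil => rfl
  | cons x xs ih => simp only [pvRloop, List.foldl_cons] at *; split <;> simp [ih]

theorem pvRloop_getElem? (C : Int → Bool) (v : Int → Int) (xs r : List Int) (j : Nat)
    (hx : ∀ x ∈ xs, 0 ≤ x) :
    (pvRloop C v xs r)[j]? =
      if ((j : Int) ∈ xs ∧ C (j : Int) = true ∧ j < r.length) then some (v (j : Int)) else r[j]? := by
  induction xs generalizing r with
  | nil => simp [pvRloop]
  | cons x xs ih =>
    have hx0 : 0 ≤ x := hx x (by simp)
    have hxs : ∀ x ∈ xs, 0 ≤ x := fun a ha => hx a (by simp [ha])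
    simp only [pvRloop, List.foldl_cons]
    by_cases hc : C x = true
    · rw [hc, if_pos rfl]
      rw [show (List.foldl (fun r x => if C x = true then r.set x.toNat (v x) else r)
            (r.set x.toNat (v x)) xs) = pvRloop C v xs (r.set x.toNat (v x)) from rfl, ih _ hxs]
      by_cases hjx : (j : Int) = x
      · have hjn : x.toNat = j := by omega
        have hmemhead : (j : Int) ∈ x :: xs := by rw [hjx]; exact List.mem_cons_self
        by_cases hjr : j < r.length
        · by_cases hmem : (j : Int) ∈ xs ∧ C (j : Int) = true ∧ j < (r.set x.toNat (v x)).length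
          · rw [if_pos hmem, if_pos ⟨hmemhead, by rw [hjx]; exact hc, hjr⟩, hjx]
          · rw [if_neg hmem, if_pos ⟨hmemhead, by rw [hjx]; exact hc, hjr⟩]
            subst hjn
            rw [List.getElem?_set, if_pos rfl, if_pos hjr, hjx]
        · have hmem : ¬((j : Int) ∈ xs ∧ C (j : Int) = true ∧ j < (r.set x.toNat (v x)).length) := by
            simp only [List.length_set]; tauto
          rw [if_neg hmem, if_neg (by tauto)]
          rw [List.getElem?_eq_none (by simp; omega), List.getElem?_eq_none (by omega)]
      · have hne : x.toNat ≠ j := by omega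
        rw [List.getElem?_set_ne hne]
        simp only [List.length_set, List.mem_cons]
        congr 1
        simp only [eq_iff_iff]
        constructor
        · rintro ⟨h1, h2, h3⟩; exact ⟨Or.inr h1, h2, h3⟩
        · rintro ⟨h1, h2, h3⟩; exact ⟨h1.resolve_left hjx, h2, h3⟩
    · rw [if_neg hc]
      rw [show (List.foldl (fun r x => if C x = true then r.set x.toNat (v x) else r) r xs)
            = pvRloop C v xs r from rfl, ih _ hxs]
      congr 1
      simp only [List.mem_cons, eq_iff_iff]
      constructor
      · rintro ⟨h1, h2, h3⟩; exact ⟨Or.inr h1, h2, h3⟩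
      · rintro ⟨h1, h2, h3⟩
        refine ⟨?_, h2, h3⟩
        rcases h1 with h1 | h1
        · exact absurd (h1 ▸ h2) hc
        · exact h1

theorem pvRowlift (C : Int → Bool) (v : Int → Int) (xs : List Int) (s : List (List Int)) (y : Int) :
    xs.foldl (fun s x => if C x then pvCset s x y (v x) else s) s
      = s.set y.toNat (pvRloop C v xs (s.getD y.toNat [])) := by
  induction xs generalizing s with
  | nil =>
    simp only [List.foldl_nil, pvRloop]
    by_cases h : y.toNat < s.length
    · rw [List.getD_eq_getElem s [] h, List.set_getElem_self]
    · rw [List.set_eq_of_length_le (by omega)]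
  | cons x xs ih =>
    simp only [List.foldl_cons]
    by_cases hc : C x = true
    · rw [if_pos hc, ih]
      have hget : (pvCset s x y (v x)).getD y.toNat [] = (s.getD y.toNat []).set x.toNat (v x) := by
        by_cases h : y.toNat < s.length
        · simp only [pvCset, List.getD_eq_getElem?_getD, List.getElem?_set]
          simp [h]
        · have h2 : s[y.toNat]? = none := List.getElem?_eq_none (by omega)
          simp [pvCset, h2,
            List.set_eq_of_length_le (show s.length ≤ y.toNat by omega)]
      rw [hget, pvCset, List.set_set]
      congr 1
      simp [pvRloop, hc]
    · rw [if_neg hc, ih]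
      congr 1
      simp [pvRloop, hc]

theorem pvOloop_length (R : Int → List Int → List Int) (ys : List Int) (s : List (List Int)) :
    (ys.foldl (fun s y => s.set y.toNat (R y (s.getD y.toNat []))) s).length = s.length := by
  induction ys generalizing s with
  | nil => rfl
  | cons y ys ih => simp only [List.foldl_cons]; rw [ih, List.length_set]

theorem pvOloop_getElem? (R : Int → List Int → List Int) (ys : List Int) (s : List (List Int))
    (j : Nat) (hnd : ys.Nodup) (hx : ∀ y ∈ ys, 0 ≤ y) :
    (ys.foldl (fun s y => s.set y.toNat (R y (s.getD y.toNat []))) s)[j]? =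
      if ((j : Int) ∈ ys ∧ j < s.length) then some (R (j : Int) (s.getD j [])) else s[j]? := by
  induction ys generalizing s with
  | nil => simp
  | cons y ys ih =>
    have hy0 : 0 ≤ y := hx y (by simp)
    have hys : ∀ y ∈ ys, 0 ≤ y := fun a ha => hx a (by simp [ha])
    have hnd' : ys.Nodup := hnd.of_cons
    simp only [List.foldl_cons]
    rw [ih _ hnd' hys]
    by_cases hjy : (j : Int) = y
    · have hjn : y.toNat = j := by omega
      have hmem : (j : Int) ∉ ys := by rw [hjy]; exact (List.nodup_cons.mp hnd).1
      by_cases hjr : j < s.length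
      · rw [if_neg (by simp only [List.length_set]; tauto),
          if_pos ⟨by rw [hjy]; exact List.mem_cons_self, hjr⟩]
        subst hjn
        rw [List.getElem?_set, if_pos rfl, if_pos hjr, hjy]
      · rw [if_neg (by simp only [List.length_set]; tauto), if_neg (by tauto)]
        subst hjn
        rw [List.set_eq_of_length_le (by omega)]
    · have hne : y.toNat ≠ j := by omega
      rw [List.getElem?_set_ne hne]
      have hget : (s.set y.toNat (R y (s.getD y.toNat []))).getD j []
          = s.getD j [] := by
        simp [List.getD_eq_getElem?_getD, List.getElem?_set_ne hne]
      rw [hget]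
      simp only [List.length_set, List.mem_cons]
      congr 1
      simp only [eq_iff_iff]
      constructor
      · rintro ⟨h1, h2⟩; exact ⟨Or.inr h1, h2⟩
      · rintro ⟨h1, h2⟩; exact ⟨h1.resolve_left hjy, h2⟩

theorem pvGloop_tileOf (C : Int → Int → Bool) (v : Int → Int → Int) (f : Int → Int → Int) :
    pvGloop C v (pvTileOf f) = pvTileOf (fun x y => if C x y then v x y else f x y) := by
  have hnd : pvRng.Nodup := PySem.List.nodup_pyRange_one 0 16
  have hnn : ∀ y ∈ pvRng, (0:Int) ≤ y := by
    intro y hy; exact ((PySem.List.mem_pyRange_one).mp hy).1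
  have hlen : pvRng.length = 16 := by
    rw [pvRng, PySem.List.length_pyRange_one]; rfl
  have hrow : ∀ (g : Int → Int → Int) (j : Nat), j < 16 →
      (pvTileOf g)[j]? = some (pvRng.map (fun x => g x (j : Int))) := by
    intro g j hj
    rw [pvTileOf, List.getElem?_map, pvRng, PySem.List.getElem?_pyRange_one]
    norm_num [hj]
  have hrowD : ∀ (g : Int → Int → Int) (j : Nat), j < 16 →
      (pvTileOf g).getD j [] = pvRng.map (fun x => g x (j : Int)) := by
    intro g j hj
    rw [List.getD_eq_getElem?_getD, hrow g j hj]; rfl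
  have hlenT : ∀ (g : Int → Int → Int), (pvTileOf g).length = 16 := by
    intro g; rw [pvTileOf, List.length_map, hlen]
  have hrloop : ∀ (j : Nat), j < 16 →
      pvRloop (fun x => C x (j : Int)) (fun x => v x (j : Int)) pvRng
          (pvRng.map (fun x => f x (j : Int)))
        = pvRng.map (fun x => if C x (j : Int) then v x (j : Int) else f x (j : Int)) := by
    intro j hj
    apply List.ext_getElem?
    intro k
    by_cases hk : k < 16
    · rw [pvRloop_getElem? _ _ _ _ _ hnn]
      have hmem : ((k : Int)) ∈ PySem.List.pyRange 0 16 1 := by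
        rw [PySem.List.mem_pyRange_one]; constructor <;> [positivity; exact_mod_cast hk]
      have hklen : k < (pvRng.map (fun x => f x (j : Int))).length := by
        rw [List.length_map, hlen]; exact hk
      by_cases hc : C ((k : Int)) ((j : Int)) = true
      · rw [if_pos ⟨by rw [pvRng]; simpa using hmem, hc, hklen⟩]
        simp [pvRng, hk, hc]
      · rw [if_neg (by tauto)]
        simp [pvRng, hk, hc]
    · have h1 : k ≥ (pvRloop (fun x => C x (j:Int)) (fun x => v x (j:Int)) pvRng
          (pvRng.map (fun x => f x (j : Int)))).length := by
        rw [pvRloop_length, List.length_map, hlen]; omega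
      rw [List.getElem?_eq_none (by omega), List.getElem?_eq_none (by rw [List.length_map, hlen]; omega)]
  simp only [pvGloop, pvRowlift]
  apply List.ext_getElem?
  intro j
  by_cases hj : j < 16
  · rw [pvOloop_getElem? _ _ _ _ hnd hnn, hrowD f j hj,
      if_pos ⟨by
        rw [pvRng, PySem.List.mem_pyRange_one]; constructor <;> [positivity; exact_mod_cast hj],
        by rw [hlenT]; exact hj⟩,
      hrow _ j hj, hrloop j hj]
  · rw [List.getElem?_eq_none, List.getElem?_eq_none (by rw [hlenT]; omega)]
    rw [pvOloop_length, hlenT]; omega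


def pvNA (seed x y : Int) : Int := PySem.Int.mod (x * (11 + seed) + y * (7 + seed * 2) + seed * 13) 37
def pvCA (seed x y : Int) : Bool :=
  decide (pvNA seed x y < 4 ∨ pvNA seed x y = 9 ∨ pvNA seed x y = 10 ∨ PySem.Int.mod (x + y + seed) 11 = 0)
def pvVA (seed x y : Int) : Int :=
  if pvNA seed x y < 4 then 11 else if pvNA seed x y = 9 ∨ pvNA seed x y = 10 then 10 else 6

theorem pvA_eq_gloop (seed : Int) :
    grass_tile_variant seed = pvGloop (pvCA seed) (pvVA seed) (pvTileOf (fun _ _ => 3)) := by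
  rw [grass_tile_variant, pvGloop]
  have hbase : pvMakeSprite 3 = pvTileOf (fun _ _ => 3) := rfl
  rw [hbase]
  apply PySem.List.foldl_congr_mem'
  intro y hy s
  apply PySem.List.foldl_congr_mem'
  intro x hx s'
  rw [PySem.List.mem_pyRange_one] at hy hx
  have hput : ∀ c, pvPut s' x y c = pvCset s' x y c := by
    intro c; rw [pvPut, if_pos ⟨hx.1, hx.2, hy.1, hy.2⟩, pvCset]
  simp only [pvCA, pvVA, pvNA, hput]
  split_ifs with h1 h2 h3 h4 h5 <;> simp_all <;> omega

theorem pvA_eq_tileOf (seed : Int) :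
    grass_tile_variant seed = pvTileOf (fun x y =>
      let n := PySem.Int.mod (x * (11 + seed) + y * (7 + seed * 2) + seed * 13) 37
      if n < 4 then 11
      else if n = 9 ∨ n = 10 then 10
      else if PySem.Int.mod (x + y + seed) 11 = 0 then 6
      else 3) := by
  rw [pvA_eq_gloop, pvGloop_tileOf]
  congr 1
  funext x y
  simp only [pvCA, pvVA, pvNA, decide_eq_true_eq]
  split_ifs <;> simp_all <;> omega

theorem pvPass_eq (P : Int → Int → Prop) [inst : ∀ x y, Decidable (P x y)] (c : Int)
    (s : List (List Int)) :
    (PySem.List.pyRange 0 16 1).foldl (fun s y =>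
      (PySem.List.pyRange 0 16 1).foldl (fun s x =>
        if P x y then s.set y.toNat ((s.getD y.toNat []).set x.toNat c) else s) s) s
      = pvGloop (fun x y => decide (P x y)) (fun _ _ => c) s := by
  rw [pvGloop]
  apply PySem.List.foldl_congr_mem'
  intro y _ t
  apply PySem.List.foldl_congr_mem'
  intro x _ t'
  by_cases h : P x y <;> simp [h, pvCset]

theorem pvB_eq_tileOf (seed : Int) :
    grass_tile_variant_alt seed = pvTileOf (fun x y =>
      let n := PySem.Int.mod (x * (11 + seed) + y * (7 + seed * 2) + seed * 13) 37
      if n < 4 then 11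
      else if n = 9 ∨ n = 10 then 10
      else if PySem.Int.mod (x + y + seed) 11 = 0 then 6
      else 3) := by
  have hbase : (PySem.List.pyRange 0 16 1).map (fun _ => List.replicate 16 (3 : Int))
      = pvTileOf (fun _ _ => 3) := by decide
  simp only [grass_tile_variant_alt]
  rw [hbase, pvPass_eq, pvPass_eq, pvPass_eq, pvGloop_tileOf, pvGloop_tileOf, pvGloop_tileOf]
  congr 1
  funext x y
  simp only [decide_eq_true_eq]

-- ===== VERDICT (by name: the statement is the Claim_ definition above) =====
theorem grass_tile_variant_spec : Claim_equal_grass_tile_variant := by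
  intro seed _
  unfold Spec_grass_tile_variant
  rw [pvA_eq_tileOf, pvB_eq_tileOf]
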